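-- pv_equiv track=rewrite | github.com/tomlxq/ps_py | huawei/StringDemo.py | findString2
-- ===== SOURCE A (Python) =====
-- def findString2(search: str, letters: str) -> int:
--     fast, slow = len(letters) - 1, len(search) - 1
--     while fast >= 0 and slow >= 0:
--         if search[slow] == letters[fast]:
--             if slow == 0:
--                 return fast
--             slow -= 1
--         fast -= 1
--     return -1
-- ===== SOURCE B (Python) =====
-- def findString2(search: str, letters: str) -> int:
--     if not search:
--         return -1
--     positions = {}
--     for i, ch in enumerate(letters):
--         positions.setdefault(ch, []).append(i)
--     pos = len(letters)
--     for ch in reversed(search):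
--         idxs = positions.get(ch)
--         if idxs is None:
--             return -1
--         lo, hi = 0, len(idxs)
--         while lo < hi:
--             mid = (lo + hi) // 2
--             if idxs[mid] < pos:
--                 lo = mid + 1
--             else:
--                 hi = mid
--         if lo == 0:
--             return -1
--         pos = idxs[lo - 1]
--     return pos
-- ===== Notes on version B (the rewrite author's own statement) =====
-- stated objective: alternative
-- what changed: Replaces A's single backward two-pointer scan of letters with a prebuilt dict from character to its sorted position list plus a hand-written binary search (bisect_left) per character of search, so the scan over letters disappears from the matching loop.
import Mathlib
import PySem

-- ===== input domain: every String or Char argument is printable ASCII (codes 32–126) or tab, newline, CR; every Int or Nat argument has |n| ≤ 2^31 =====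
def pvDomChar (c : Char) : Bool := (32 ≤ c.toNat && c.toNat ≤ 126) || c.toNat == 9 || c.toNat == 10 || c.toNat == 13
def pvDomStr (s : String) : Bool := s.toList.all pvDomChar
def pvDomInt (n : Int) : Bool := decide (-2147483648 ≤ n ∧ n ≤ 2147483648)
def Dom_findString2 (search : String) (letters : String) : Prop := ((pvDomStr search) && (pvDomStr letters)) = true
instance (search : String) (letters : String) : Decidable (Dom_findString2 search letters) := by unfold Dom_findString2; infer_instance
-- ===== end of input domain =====

-- B replaces A's backward two-pointer scan of letters by a dict of per-character
-- position lists built once, walked with a hand-written binary search; objective: alternative.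

-- ===== PORT A =====
-- A's while loop, fuel = fast + 1 (fast = fuel - 1 each step; fuel 0 ⇔ fast < 0).
def findString2.loopA (search letters : List Char) : (slow : Int) → (fuel : Nat) → Int
  | _, 0 => -1
  | slow, f + 1 =>
    if slow ≥ 0 then
      if search.getD slow.toNat ' ' = letters.getD f ' ' then
        if slow = 0 then (f : Int)
        else findString2.loopA search letters (slow - 1) f
      else findString2.loopA search letters slow f
    else -1

def findString2 (search : String) (letters : String) : Int :=
  findString2.loopA search.toList letters.toList ((search.toList.length : Int) - 1) letters.toList.length

-- ===== PORT B =====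
-- positions = {}; for i, ch in enumerate(letters): positions.setdefault(ch, []).append(i)
def findString2_alt.build (letters : List Char) : PySem.Dict Char (List Int) :=
  (PySem.List.enumerate letters).foldl
    (fun d p => d.insert p.2 (d.getD p.2 [] ++ [p.1])) PySem.Dict.empty

-- the hand-written bisect_left while-loop: while lo < hi: mid = (lo+hi)//2; …
def findString2_alt.bs (idxs : List Int) (pos : Int) (lo hi : Nat) : Nat :=
  if h : lo < hi then
    let mid := (lo + hi) / 2
    if idxs.getD mid 0 < pos then findString2_alt.bs idxs pos (mid + 1) hi
    else findString2_alt.bs idxs pos lo mid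
  else lo
termination_by hi - lo
decreasing_by all_goals omega

-- for ch in reversed(search): …  (i walks len(search)-1 … 0, threading pos)
def findString2_alt.loopB (positions : PySem.Dict Char (List Int)) (search : List Char)
    (i : Nat) (pos : Int) : Int :=
  match positions.get? (search.getD i ' ') with
  | none => -1
  | some idxs =>
    let lo := findString2_alt.bs idxs pos 0 idxs.length
    if lo = 0 then -1
    else match i with
      | 0 => idxs.getD (lo - 1) 0
      | i' + 1 => findString2_alt.loopB positions search i' (idxs.getD (lo - 1) 0)

def findString2_alt (search : String) (letters : String) : Int :=
  if search.toList = [] then -1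
  else findString2_alt.loopB (findString2_alt.build letters.toList) search.toList
         (search.toList.length - 1) (letters.toList.length : Int)

-- ===== PRECONDITION & SPEC =====
def Spec_findString2 (search : String) (letters : String) (out : Int) : Prop := out = findString2_alt search letters
instance (search : String) (letters : String) (out : Int) : Decidable (Spec_findString2 search letters out) := by unfold Spec_findString2; infer_instance

-- ===== CLAIM (what is proved, stated in full; the proofs are below) =====
def Claim_equal_findString2 : Prop := ∀ (search : String) (letters : String), Dom_findString2 search letters → Spec_findString2 search letters (findString2 search letters)

-- ===== LEMMAS AND PROOFS =====

-- positions of c among the first pos characters of L, as Ints, ascending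
def posUpto (L : List Char) (c : Char) (pos : Nat) : List Int :=
  ((List.range pos).filter (fun k => L.getD k ' ' == c)).map Int.ofNat

-- proof-side characterisation of A's inner fast-scan: largest match index below pos
def rfindChar (letters : List Char) (c : Char) : Nat → Int
  | 0 => -1
  | p + 1 => if letters.getD p ' ' = c then (p : Int) else rfindChar letters c p

theorem posUpto_succ (L : List Char) (c : Char) (p : Nat) :
    posUpto L c (p + 1) = posUpto L c p ++ (if L.getD p ' ' = c then [(p : Int)] else []) := by
  unfold posUpto
  by_cases h : L[p]?.getD ' ' = c <;> simp [List.range_succ, List.getD, h]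

theorem rfindChar_succ (L : List Char) (c : Char) (p : Nat) :
    rfindChar L c (p + 1) = if L.getD p ' ' = c then (p : Int) else rfindChar L c p := rfl

theorem rfindChar_eq_getLastD (L : List Char) (c : Char) (pos : Nat) :
    rfindChar L c pos = (posUpto L c pos).getLastD (-1) := by
  induction pos with
  | zero => simp [rfindChar, posUpto]
  | succ p ih =>
    rw [rfindChar_succ, posUpto_succ]
    by_cases h : L[p]?.getD ' ' = c <;> simp [List.getD, h, ih]

-- A with negative slow returns -1 immediately.
theorem loopA_neg (search letters : List Char) (slow : Int) (fuel : Nat) (h : slow < 0) :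
    findString2.loopA search letters slow fuel = -1 := by
  cases fuel with
  | zero => rfl
  | succ f => simp [findString2.loopA, not_le.mpr h]

-- A's inner fast-scan for a fixed slow = s is exactly one rfindChar step.
theorem loopA_step (search letters : List Char) (s : Nat) (fuel : Nat) :
    findString2.loopA search letters (s : Int) fuel =
      (let p := rfindChar letters (search.getD s ' ') fuel
       if p = -1 then -1
       else if s = 0 then p
       else findString2.loopA search letters ((s : Int) - 1) p.toNat) := by
  induction fuel with
  | zero => simp [findString2.loopA, rfindChar]
  | succ f ih =>
    simp only [findString2.loopA, rfindChar]
    rw [if_pos (by positivity), Int.toNat_natCast]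
    by_cases hc : search.getD s ' ' = letters.getD f ' '
    · have hc' : letters.getD f ' ' = search.getD s ' ' := hc.symm
      rw [if_pos hc, if_pos hc']
      have hne : ¬ ((f : Int) = -1) := by omega
      rw [if_neg hne, Int.toNat_natCast]
      by_cases hs : s = 0
      · simp [hs]
      · simp [hs]
    · have hc' : ¬ (letters.getD f ' ' = search.getD s ' ') := fun h => hc h.symm
      rw [if_neg hc, if_neg hc', ih]

-- the dict fold accumulates exactly the filtered first components
theorem build_fold_getD (ps : List (Int × Char)) (d : PySem.Dict Char (List Int)) (c : Char) :
    (ps.foldl (fun d p => d.insert p.2 (d.getD p.2 [] ++ [p.1])) d).getD c [] =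
      d.getD c [] ++ (ps.filter (fun p => p.2 == c)).map (·.1) := by
  induction ps generalizing d with
  | nil => simp
  | cons p ps ih =>
    rw [List.foldl_cons, ih]
    by_cases h : c = p.2
    · subst h; simp [PySem.Dict.getD_insert_self]
    · have hb : (p.2 == c) = false := by simpa using fun hh : p.2 = c => h hh.symm
      simp [PySem.Dict.getD_insert_of_ne _ _ _ h, hb]

theorem build_fold_get?_none (ps : List (Int × Char)) (d : PySem.Dict Char (List Int)) (c : Char) :
    ((ps.foldl (fun d p => d.insert p.2 (d.getD p.2 [] ++ [p.1])) d).get? c = none ↔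
      d.get? c = none ∧ ps.filter (fun p => p.2 == c) = []) := by
  induction ps generalizing d with
  | nil => simp
  | cons p ps ih =>
    rw [List.foldl_cons, ih]
    by_cases h : c = p.2
    · subst h; simp [PySem.Dict.get?_insert_self]
    · have hb : (p.2 == c) = false := by simpa using fun hh : p.2 = c => h hh.symm
      simp [PySem.Dict.get?_insert_of_ne _ _ h, hb]

theorem enumerate_filter_map (L : List Char) (c : Char) :
    ((PySem.List.enumerate L).filter (fun p => p.2 == c)).map (·.1) = posUpto L c L.length := by
  rw [PySem.List.enumerate_eq_map_pyRange L ' ']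
  simp only [PySem.List.len_eq, PySem.List.pyRange_zero_natCast, List.map_map, List.filter_map]
  unfold posUpto
  simp [Function.comp_def, List.getD, Int.ofNat_eq_natCast]

theorem getD_of_get? {kappa nu : Type} [BEq kappa] (d : PySem.Dict kappa nu) (k : kappa)
    (v d0 : nu) (h : d.get? k = some v) : d.getD k d0 = v := by
  simp [PySem.Dict.getD, h]

theorem get?_build (letters : List Char) (c : Char) :
    (findString2_alt.build letters).get? c =
      if posUpto letters c letters.length = [] then none
      else some (posUpto letters c letters.length) := by
  unfold findString2_alt.build
  have hnone := build_fold_get?_none (PySem.List.enumerate letters) PySem.Dict.empty c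
  have hgetD := build_fold_getD (PySem.List.enumerate letters) PySem.Dict.empty c
  rw [enumerate_filter_map] at hgetD
  by_cases h : posUpto letters c letters.length = []
  · rw [if_pos h]
    apply hnone.mpr
    refine ⟨rfl, ?_⟩
    have : ((PySem.List.enumerate letters).filter (fun p => p.2 == c)).map (·.1) = [] := by
      rw [enumerate_filter_map, h]
    simpa using this
  · rw [if_neg h]
    rcases ho : (List.foldl (fun d p => d.insert p.2 (d.getD p.2 [] ++ [p.1]))
        PySem.Dict.empty (PySem.List.enumerate letters)).get? c with _ | v
    · rcases hnone.mp ho with ⟨-, hf⟩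
      have hcontra : posUpto letters c letters.length = [] := by
        rw [← enumerate_filter_map letters c, hf]; rfl
      exact absurd hcontra h
    · have hv : (List.foldl (fun d p => d.insert p.2 (d.getD p.2 [] ++ [p.1]))
          PySem.Dict.empty (PySem.List.enumerate letters)).getD c [] = v :=
        getD_of_get? _ _ _ _ ho
      rw [ho]
      rw [hv] at hgetD
      rw [hgetD]
      simp

-- the binary search returns any t consistent with the bound predicate
theorem bs_spec (idxs : List Int) (pos : Int) (t : Nat) :
    ∀ (n lo hi : Nat), hi - lo ≤ n → lo ≤ t → t ≤ hi →
      (∀ k, lo ≤ k → k < hi → (idxs.getD k 0 < pos ↔ k < t)) →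
      findString2_alt.bs idxs pos lo hi = t := by
  intro n
  induction n with
  | zero =>
    intro lo hi h1 h2 h3 _
    rw [findString2_alt.bs]
    have : ¬ lo < hi := by omega
    rw [dif_neg this]; omega
  | succ n ih =>
    intro lo hi h1 h2 h3 hiff
    rw [findString2_alt.bs]
    by_cases hlt : lo < hi
    · rw [dif_pos hlt]
      have hmid1 : lo ≤ (lo + hi) / 2 := by omega
      have hmid2 : (lo + hi) / 2 < hi := by omega
      by_cases hc : idxs.getD ((lo + hi) / 2) 0 < pos
      · rw [if_pos hc]
        have ht : (lo + hi) / 2 < t := (hiff _ hmid1 hmid2).mp hc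
        exact ih _ _ (by omega) (by omega) h3 (fun k hk1 hk2 => hiff k (by omega) hk2)
      · rw [if_neg hc]
        have ht : t ≤ (lo + hi) / 2 := by
          by_contra hh
          exact hc ((hiff _ hmid1 hmid2).mpr (by omega))
        exact ih _ _ (by omega) h2 ht (fun k hk1 hk2 => hiff k hk1 (by omega))
    · rw [dif_neg hlt]; omega

theorem posUpto_split (L : List Char) (c : Char) (pos : Nat) (hpos : pos ≤ L.length) :
    ∃ R, posUpto L c L.length = posUpto L c pos ++ R ∧
      (∀ x ∈ posUpto L c pos, x < (pos : Int)) ∧ (∀ x ∈ R, ¬ x < (pos : Int)) := by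
  refine ⟨((List.range' pos (L.length - pos)).filter (fun k => L.getD k ' ' == c)).map
    Int.ofNat, ?_, ?_, ?_⟩
  · unfold posUpto
    rw [← List.map_append, ← List.filter_append]
    congr 2
    rw [List.range_eq_range', List.range_eq_range',
      show L.length = pos + (L.length - pos) from by omega, ← List.range'_append]
    norm_num
  · intro x hx
    unfold posUpto at hx
    simp only [List.mem_map, List.mem_filter, List.mem_range] at hx
    obtain ⟨k, ⟨hk, -⟩, rfl⟩ := hx
    simp only [Int.ofNat_eq_natCast]
    exact_mod_cast hk
  · intro x hx
    simp only [List.mem_map, List.mem_filter, List.mem_range'_1] at hx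
    obtain ⟨k, ⟨⟨hk, -⟩, -⟩, rfl⟩ := hx
    simp only [Int.ofNat_eq_natCast]
    omega

-- B's one bisect step over the full position list computes rfindChar
theorem bisect_step (L : List Char) (c : Char) (pos : Nat) (hpos : pos ≤ L.length) :
    findString2_alt.bs (posUpto L c L.length) (pos : Int) 0 (posUpto L c L.length).length
        = (posUpto L c pos).length ∧
      ((posUpto L c pos).length ≠ 0 →
        (posUpto L c L.length).getD ((posUpto L c pos).length - 1) 0 = rfindChar L c pos) := by
  obtain ⟨R, hPR, hQ, hR⟩ := posUpto_split L c pos hpos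
  have hlen : (posUpto L c pos).length ≤ (posUpto L c L.length).length := by
    rw [hPR]; simp
  constructor
  · refine bs_spec (posUpto L c L.length) (pos : Int) (posUpto L c pos).length
      (posUpto L c L.length).length 0 (posUpto L c L.length).length (by omega) (Nat.zero_le _)
      hlen ?_
    intro k _ hk
    rw [hPR] at hk ⊢
    simp only [List.length_append] at hk
    by_cases hkQ : k < (posUpto L c pos).length
    · rw [List.getD_eq_getElem _ _ (by simp; omega), List.getElem_append_left hkQ]
      exact ⟨fun _ => hkQ, fun _ => hQ _ (List.getElem_mem _)⟩
    · push_neg at hkQ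
      rw [List.getD_eq_getElem _ _ (by simp; omega), List.getElem_append_right hkQ]
      exact ⟨fun hc => absurd hc (hR _ (List.getElem_mem _)), fun hh => absurd hh (by omega)⟩
  · intro hne
    rw [rfindChar_eq_getLastD]
    have hQne : posUpto L c pos ≠ [] := fun hh => hne (by rw [hh]; rfl)
    have hlt : (posUpto L c pos).length - 1 < (posUpto L c pos).length := by
      have := List.length_pos_iff.mpr hQne; omega
    rw [hPR, List.getD_eq_getElem _ _ (by simp; omega), List.getElem_append_left hlt]
    rw [List.getLastD_eq_getLast?, List.getLast?_eq_getElem?, List.getElem?_eq_getElem hlt]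
    rfl

-- A's loop equals B's loop (pos within bounds).
theorem loopA_eq_loopB (search letters : List Char) :
    ∀ (s : Nat) (pos : Nat), pos ≤ letters.length →
      findString2.loopA search letters (s : Int) pos =
        findString2_alt.loopB (findString2_alt.build letters) search s (pos : Int) := by
  intro s
  induction s using Nat.strong_induction_on with
  | _ s ih =>
    intro pos hpos
    rw [loopA_step]
    set c := search.getD s ' ' with hc
    unfold findString2_alt.loopB
    rw [get?_build]
    by_cases hP : posUpto letters c letters.length = []
    · rw [if_pos hP]
      have hQ : posUpto letters c pos = [] := by
        obtain ⟨R, hPR, -, -⟩ := posUpto_split letters c pos hpos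
        rw [hP] at hPR
        exact List.append_eq_nil_iff.mp hPR.symm |>.1
      rw [rfindChar_eq_getLastD, hQ]
      simp
    · rw [if_neg hP]
      obtain ⟨hlo, hval⟩ := bisect_step letters c pos hpos
      simp only
      rw [hlo]
      by_cases hz : (posUpto letters c pos).length = 0
      · rw [if_pos hz]
        have : posUpto letters c pos = [] := List.length_eq_zero_iff.mp hz
        rw [rfindChar_eq_getLastD, this]
        simp
      · rw [if_neg hz]
        have hvv := hval hz
        rw [hvv]
        -- rfindChar is some in-range index k
        have hrf : ∃ k : Nat, k < pos ∧ rfindChar letters c pos = (k : Int) := by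
          rw [rfindChar_eq_getLastD]
          have hQne : posUpto letters c pos ≠ [] := fun h => hz (by rw [h]; rfl)
          have hmem : (posUpto letters c pos).getLastD (-1) ∈ posUpto letters c pos := by
            rw [List.getLastD_eq_getLast?, List.getLast?_eq_getLast (h := hQne)]
            exact List.getLast_mem hQne
          unfold posUpto at hmem
          simp only [List.mem_map, List.mem_filter, List.mem_range] at hmem
          obtain ⟨k, ⟨hk, -⟩, hkeq⟩ := hmem
          exact ⟨k, hk, by simpa [posUpto, Int.ofNat_eq_natCast] using hkeq.symm⟩
        obtain ⟨k, hk, hkeq⟩ := hrf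
        have hne : rfindChar letters c pos ≠ -1 := by rw [hkeq]; omega
        rw [if_neg hne]
        cases s with
        | zero => simp [hkeq]
        | succ s' =>
          rw [if_neg (by omega : ¬ s' + 1 = 0)]
          have hcast : ((s' + 1 : Nat) : Int) - 1 = (s' : Int) := by push_cast; ring
          rw [hkeq, hcast, Int.toNat_natCast]
          exact ih s' (by omega) k (by omega)

theorem findString2_eq (search letters : String) :
    findString2 search letters = findString2_alt search letters := by
  unfold findString2 findString2_alt
  by_cases h : search.toList = []
  · rw [if_pos h, h]
    simp only [List.length_nil, Nat.cast_zero, zero_sub]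
    exact loopA_neg _ _ _ _ (by norm_num)
  · rw [if_neg h]
    have hpos : 0 < search.toList.length := by
      cases hs : search.toList <;> simp_all
    have hlen : (search.toList.length : Int) - 1 = ((search.toList.length - 1 : Nat) : Int) := by
      omega
    rw [hlen]
    exact loopA_eq_loopB search.toList letters.toList _ letters.toList.length le_rfl

-- ===== VERDICT (by name: the statement is the Claim_ definition above) =====
theorem findString2_spec : Claim_equal_findString2 := by
  intro search letters _
  unfold Spec_findString2
  exact findString2_eq search letters
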